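-- pv_equiv track=rewrite | github.com/aecant/ChrestomathyCode | chrestomathy_code/tasks/leetcode/trapping_rain_water/trapping_rain_water.py | count_half
-- ===== SOURCE A (Python) =====
-- def count_half(height: list[int]) -> int:
--     sorted_tuples = sorted(enumerate(height), key=lambda t: t[1])
--     max_pos = 0
--     trapped = 0
--
--     while sorted_tuples:
--         next_max_pos, next_max_height = sorted_tuples.pop()
--
--         if next_max_pos <= max_pos:
--             continue
--
--         for h in height[max_pos + 1: next_max_pos]:
--             trapped += next_max_height - h
--
--         max_pos = next_max_pos
--
--     return trapped
-- ===== SOURCE B (Python) =====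
-- def count_half(height: list[int]) -> int:
--     trapped = 0
--     rmax = None
--     for h in reversed(height[1:]):
--         if rmax is None or h > rmax:
--             rmax = h
--         trapped += rmax - h
--     return trapped
-- ===== Notes on version B (the rewrite author's own statement) =====
-- stated objective: faster
-- what changed: Replaced the sort-enumerate-and-pop scheme (sort by height, repeatedly take the next maximum and fill the gap with an inner slice loop) by a single right-to-left pass keeping a running suffix maximum and adding (suffix max - h) at each index after the first.
import Mathlib
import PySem

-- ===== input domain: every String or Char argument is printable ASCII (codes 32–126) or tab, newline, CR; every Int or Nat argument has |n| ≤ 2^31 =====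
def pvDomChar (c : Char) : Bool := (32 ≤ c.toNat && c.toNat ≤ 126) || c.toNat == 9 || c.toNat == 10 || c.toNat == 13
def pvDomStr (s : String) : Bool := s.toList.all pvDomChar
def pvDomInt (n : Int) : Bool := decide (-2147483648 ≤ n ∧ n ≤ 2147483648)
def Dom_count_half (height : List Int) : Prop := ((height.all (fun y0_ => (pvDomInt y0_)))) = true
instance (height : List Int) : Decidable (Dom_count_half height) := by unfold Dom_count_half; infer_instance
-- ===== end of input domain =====

-- B replaces A's sort-then-fill scheme by a single right-to-left suffix-maximum pass.

-- ===== PORT A =====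
-- 'while sorted_tuples: … = sorted_tuples.pop()' pops from the end until empty:
-- recursion over the reversed sorted list, state (max_pos, trapped).
def countHalfLoop (height : List Int) : List (Int × Int) → Int × Int → Int × Int
  | [], st => st
  | (p, h) :: rest, (mp, tr) =>
      if p ≤ mp then countHalfLoop height rest (mp, tr)
      else
        countHalfLoop height rest
          (p, (PySem.List.slice height (some (mp + 1)) (some p)).foldl (fun t x => t + (h - x)) tr)

def count_half (height : List Int) : Int :=
  let sorted_tuples := PySem.List.sorted (PySem.List.enumerate height) (fun t => t.2) false
  (countHalfLoop height sorted_tuples.reverse (0, 0)).2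

-- ===== PORT B =====
-- state = (rmax : Option Int, trapped); loop body of 'for h in reversed(height[1:])'
def countAltLoop : List Int → Option Int × Int → Option Int × Int
  | [], st => st
  | h :: rest, (rmax, tr) =>
      let m : Int := match rmax with
        | none => h
        | some m0 => if h > m0 then h else m0
      countAltLoop rest (some m, tr + (m - h))

def count_half_alt (height : List Int) : Int :=
  (countAltLoop (PySem.List.slice height (some 1) none).reverse (none, 0)).2

-- ===== PRECONDITION & SPEC =====
def Spec_count_half (height : List Int) (out : Int) : Prop := out = count_half_alt height
instance (height : List Int) (out : Int) : Decidable (Spec_count_half height out) := by unfold Spec_count_half; infer_instance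

-- ===== CLAIM (what is proved, stated in full; the proofs are below) =====
def Claim_equal_count_half : Prop := ∀ (height : List Int), Dom_count_half height → Spec_count_half height (count_half height)

-- ===== LEMMAS AND PROOFS =====

-- B's loop step, and B's loop as a right fold over the un-reversed list
def altStep (h : Int) (st : Option Int × Int) : Option Int × Int :=
  let m : Int := match st.1 with
    | none => h
    | some m0 => if h > m0 then h else m0
  (some m, st.2 + (m - h))

def G (l : List Int) : Option Int × Int := l.foldr altStep (none, 0)

lemma countAltLoop_eq_foldl (l : List Int) : ∀ st, countAltLoop l st = l.foldl (fun st h => altStep h st) st := by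
  induction l with
  | nil => intro st; rfl
  | cons h t ih => intro ⟨r, tr⟩; simp [countAltLoop, altStep, List.foldl_cons, ih]

lemma alt_eq_G (height : List Int) : count_half_alt height = (G height.tail).2 := by
  unfold count_half_alt
  rw [PySem.List.slice_from_one, countAltLoop_eq_foldl, List.foldl_reverse]
  rfl

lemma G_cons (h : Int) (t : List Int) :
    G (h :: t) = altStep h (G t) := rfl

lemma G_fst_none (l : List Int) : (G l).1 = none → l = [] := by
  cases l with
  | nil => intro; rfl
  | cons h t => intro hn; simp [G_cons, altStep] at hn

lemma G_fst_max (l : List Int) : ∀ m, (G l).1 = some m → m ∈ l ∧ ∀ x ∈ l, x ≤ m := by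
  induction l with
  | nil => intro m hm; simp [G] at hm
  | cons h t ih =>
    intro m hm
    rcases ht : (G t).1 with _ | m0
    · have : t = [] := G_fst_none t ht
      subst this
      simp [G, altStep] at hm
      subst hm; simp
    · obtain ⟨hmem, hle⟩ := ih m0 ht
      have hm' : m = if h > m0 then h else m0 := by
        simpa [G_cons, altStep, ht] using hm.symm
      by_cases hc : h > m0
      · simp [hc] at hm'
        subst hm'
        refine ⟨by simp, ?_⟩
        intro x hx
        rcases List.mem_cons.mp hx with rfl | hx
        · exact le_refl _
        · exact le_trans (hle x hx) (le_of_lt hc)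
      · simp [hc] at hm'
        subst hm'
        refine ⟨List.mem_cons_of_mem _ hmem, ?_⟩
        intro x hx
        rcases List.mem_cons.mp hx with rfl | hx
        · omega
        · exact hle x hx

-- every element of a drop is an indexed element of the list
lemma mem_drop_index (l : List Int) (i : ℕ) (x : Int) (hx : x ∈ l.drop i) :
    ∃ (j : ℕ) (hj : j < l.length), i ≤ j ∧ l[j] = x := by
  obtain ⟨k, hk, he⟩ := List.getElem_of_mem hx
  have hk' : i + k < l.length := by
    have := l.length_drop (i := i); omega
  refine ⟨i + k, hk', by omega, ?_⟩
  rw [← he, List.getElem_drop]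

lemma getElem_mem_drop (l : List Int) (i j : ℕ) (hj : j < l.length) (hij : i ≤ j) :
    l[j] ∈ l.drop i := by
  have hlt : j - i < (l.drop i).length := by simp [List.length_drop]; omega
  have : (l.drop i)[j - i] = l[j] := by
    rw [List.getElem_drop]; congr 1; omega
  exact this ▸ List.getElem_mem hlt

-- the suffix maximum over drop i is h, when h sits at k0 ≥ i and bounds the suffix
lemma G_fst_eq (height : List Int) (h : Int) (k0 : ℕ) (hk0 : k0 < height.length)
    (hh : height[k0] = h) (i : ℕ) (hik : i ≤ k0)
    (hb : ∀ x ∈ height.drop i, x ≤ h) :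
    (G (height.drop i)).1 = some h := by
  rcases hf : (G (height.drop i)).1 with _ | m
  · have := G_fst_none _ hf
    have : height[k0] ∈ height.drop i := getElem_mem_drop _ _ _ hk0 hik
    simp [‹height.drop i = []›] at this
  · obtain ⟨hmem, hle⟩ := G_fst_max _ m hf
    have h1 : m ≤ h := hb m hmem
    have h2 : h ≤ m := by
      have : height[k0] ∈ height.drop i := getElem_mem_drop _ _ _ hk0 hik
      rw [hh] at this
      exact hle h this
    rw [le_antisymm h1 h2]

-- telescoping fill: summing (h - x) over height[i:k0] bridges the suffix sums at i and k0+1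
lemma fill (height : List Int) (h : Int) (k0 : ℕ) (hk0 : k0 < height.length)
    (hh : height[k0] = h) :
    ∀ (d i : ℕ), i + d = k0 → (∀ x ∈ height.drop i, x ≤ h) →
    (G (height.drop i)).2
      = (((height.drop i).take (k0 - i)).map (fun x => h - x)).sum + (G (height.drop (k0 + 1))).2 := by
  intro d
  induction d with
  | zero =>
    intro i hi hb
    have hik : i = k0 := by omega
    subst hik
    have hcons : height.drop i = height[i] :: height.drop (i + 1) :=
      List.drop_eq_getElem_cons hk0
    rw [hcons]
    have hb' : ∀ x ∈ height.drop (i + 1), x ≤ h := by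
      intro x hx
      apply hb
      rw [hcons]; exact List.mem_cons_of_mem _ hx
    have hm : (match (G (height.drop (i+1))).1 with
        | none => height[i]
        | some m0 => if height[i] > m0 then height[i] else m0) = h := by
      rcases hf : (G (height.drop (i+1))).1 with _ | m
      · simpa using hh
      · -- i = k0, so the suffix max m of drop (i+1) satisfies m ≤ h, and height[i] = h
        obtain ⟨hmem, _⟩ := G_fst_max _ m hf
        have hmle : m ≤ h := hb' m hmem
        simp only [hh]
        by_cases hc : h > m
        · simp [hc]
        · simp [hc]; omega
    rw [Nat.sub_self, List.take_zero]
    simp only [List.map_nil, List.sum_nil, zero_add]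
    rw [G_cons]
    simp only [altStep]
    rw [hm, hh]
    ring
  | succ d ih =>
    intro i hi hb
    have hik : i < k0 := by omega
    have hilen : i < height.length := by omega
    have hcons : height.drop i = height[i] :: height.drop (i + 1) :=
      List.drop_eq_getElem_cons hilen
    have hb' : ∀ x ∈ height.drop (i + 1), x ≤ h := by
      intro x hx
      apply hb
      rw [hcons]; exact List.mem_cons_of_mem _ hx
    have hfst : (G (height.drop (i + 1))).1 = some h :=
      G_fst_eq height h k0 hk0 hh (i + 1) (by omega) hb'
    have hm : (match (G (height.drop (i+1))).1 with
        | none => height[i]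
        | some m0 => if height[i] > m0 then height[i] else m0) = h := by
      rw [hfst]
      have : height[i] ≤ h := by
        apply hb; rw [hcons]; exact List.mem_cons_self
      by_cases hc : height[i] > h
      · omega
      · simp [hc]
    have htake : (height.drop i).take (k0 - i)
        = height[i] :: (height.drop (i + 1)).take (k0 - (i + 1)) := by
      rw [hcons]
      have : k0 - i = (k0 - (i + 1)) + 1 := by omega
      rw [this, List.take_succ_cons]
    rw [htake]
    have hrec := ih (i + 1) (by omega) hb'
    rw [hcons]
    simp only [G_cons, altStep, List.map_cons, List.sum_cons]
    simp only [hm, hrec]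
    ring

-- invariant of A's pop loop
lemma loop_eq (height : List Int) : ∀ (L : List (Int × Int)) (mp : ℕ) (tr : Int),
    (∀ q ∈ L, ∃ (k : ℕ) (hk : k < height.length), q = ((k : Int), height[k])) →
    L.Pairwise (fun a b => b.2 ≤ a.2) →
    (∀ (k : ℕ) (hk : k < height.length), (mp : Int) < (k : Int) → ((k : Int), height[k]) ∈ L) →
    (countHalfLoop height L ((mp : Int), tr)).2 = tr + (G (height.drop (mp + 1))).2 := by
  intro L
  induction L with
  | nil =>
    intro mp tr _ _ hcov
    have hdrop : height.drop (mp + 1) = [] := by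
      apply List.drop_eq_nil_of_le
      by_cases hlt : mp + 1 < height.length
      · exact absurd (hcov (mp + 1) hlt (by omega)) (List.not_mem_nil)
      · omega
    simp [countHalfLoop, hdrop, G]
  | cons q rest ih =>
    intro mp tr hmem hpw hcov
    obtain ⟨k0, hk0, hq⟩ := hmem q List.mem_cons_self
    subst hq
    by_cases hple : (k0 : Int) ≤ (mp : Int)
    · -- skipped element
      rw [show countHalfLoop height (((k0:Int), height[k0]) :: rest) ((mp:Int), tr)
            = countHalfLoop height rest ((mp:Int), tr) by simp [countHalfLoop, hple]]
      apply ih mp tr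
      · intro q hq; exact hmem q (List.mem_cons_of_mem _ hq)
      · exact hpw.of_cons
      · intro k hk hmk
        have hne : ((k:Int), height[k]) ≠ ((k0:Int), height[k0]) := by
          intro he
          have : (k : Int) = (k0 : Int) := congrArg Prod.fst he
          omega
        rcases List.mem_cons.mp (hcov k hk hmk) with he | hmemr
        · exact absurd he hne
        · exact hmemr
    · -- new maximum position k0 > mp
      have hmpk : mp < k0 := by omega
      rw [show countHalfLoop height (((k0:Int), height[k0]) :: rest) ((mp:Int), tr)
            = countHalfLoop height rest ((k0:Int),
                (PySem.List.slice height (some ((mp:Int) + 1)) (some (k0:Int))).foldl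
                  (fun t x => t + (height[k0] - x)) tr) by
            simp [countHalfLoop, hple]]
      have hb : ∀ x ∈ height.drop (mp + 1), x ≤ height[k0] := by
        intro x hx
        obtain ⟨j, hj, hij, hjx⟩ := mem_drop_index height (mp + 1) x hx
        have hmemL : ((j:Int), height[j]) ∈ ((k0:Int), height[k0]) :: rest :=
          hcov j hj (by omega)
        rcases List.mem_cons.mp hmemL with he | hmemr
        · have : height[j] = height[k0] := congrArg Prod.snd he
          omega
        · have := (List.pairwise_cons.mp hpw).1 _ hmemr
          simp at this
          omega
      have hslice : PySem.List.slice height (some ((mp:Int) + 1)) (some (k0:Int))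
          = (height.drop (mp + 1)).take (k0 - (mp + 1)) := by
        have h1 : (mp : Int) + 1 = ((mp + 1 : ℕ) : Int) := by push_cast; ring
        rw [h1, PySem.List.slice_natCast]
      have hfold : (PySem.List.slice height (some ((mp:Int) + 1)) (some (k0:Int))).foldl
            (fun t x => t + (height[k0] - x)) tr
          = tr + (((height.drop (mp + 1)).take (k0 - (mp + 1))).map (fun x => height[k0] - x)).sum := by
        rw [hslice, PySem.List.foldl_add]
      rw [hfold]
      rw [ih k0 _ (fun q hq => hmem q (List.mem_cons_of_mem _ hq)) hpw.of_cons ?_]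
      · rw [fill height height[k0] k0 hk0 rfl (k0 - (mp + 1)) (mp + 1) (by omega) hb]
        ring
      · intro k hk hmk
        have hne : ((k:Int), height[k]) ≠ ((k0:Int), height[k0]) := by
          intro he
          have : (k : Int) = (k0 : Int) := congrArg Prod.fst he
          omega
        have hmk' : (mp : Int) < (k : Int) := by omega
        rcases List.mem_cons.mp (hcov k hk hmk') with he | hmemr
        · exact absurd he hne
        · exact hmemr

lemma count_half_eq_G (height : List Int) : count_half height = (G (height.drop 1)).2 := by
  unfold count_half
  have h := loop_eq height
      (PySem.List.sorted (PySem.List.enumerate height) (fun t => t.2) false).reverse 0 0 ?_ ?_ ?_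
  · simpa using h
  · intro q hq
    rw [List.mem_reverse, PySem.List.mem_sorted, PySem.List.mem_enumerate_iff] at hq
    obtain ⟨k, hk, he⟩ := hq
    exact ⟨k, hk, by simpa using he⟩
  · rw [List.pairwise_reverse]
    exact PySem.List.sorted_pairwise _ _
  · intro k hk _
    rw [List.mem_reverse, PySem.List.mem_sorted, PySem.List.mem_enumerate_iff]
    exact ⟨k, hk, by simp⟩

-- ===== VERDICT (by name: the statement is the Claim_ definition above) =====
theorem count_half_spec : Claim_equal_count_half := by
  intro height _
  unfold Spec_count_half
  rw [count_half_eq_G, alt_eq_G, ← List.drop_one]
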